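-- pv_equiv track=rewrite | github.com/toniegorov/darts-team-manager | darts_team_manager.py | _round_winner
-- ===== SOURCE A (Python) =====
-- def _round_winner(totals, code):
--     if len(totals) < 2:
--         return None
--     items = list(totals.items())
--     if code == "min":
--         best = min(items, key=lambda x: x[1])
--         if sum(1 for _, v in items if v == best[1]) == 1:
--             return best[0]
--     else:
--         best = max(items, key=lambda x: x[1])
--         if sum(1 for _, v in items if v == best[1]) == 1:
--             return best[0]
--     return None
-- ===== SOURCE B (Python) =====
-- def _round_winner(totals, code):
--     if len(totals) < 2:
--         return None
--     rev = code != "min"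
--     s = sorted(totals.items(), key=lambda kv: kv[1], reverse=rev)
--     if s[0][1] != s[1][1]:
--         return s[0][0]
--     return None
-- ===== Notes on version B (the rewrite author's own statement) =====
-- stated objective: alternative
-- what changed: B sorts the items by value (ascending for 'min', descending otherwise) and reads the winner and runner-up off the top of the sorted list, returning the top key only when the two extreme values differ, instead of A's extremum scan followed by a second tie-counting scan.
import Mathlib
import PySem

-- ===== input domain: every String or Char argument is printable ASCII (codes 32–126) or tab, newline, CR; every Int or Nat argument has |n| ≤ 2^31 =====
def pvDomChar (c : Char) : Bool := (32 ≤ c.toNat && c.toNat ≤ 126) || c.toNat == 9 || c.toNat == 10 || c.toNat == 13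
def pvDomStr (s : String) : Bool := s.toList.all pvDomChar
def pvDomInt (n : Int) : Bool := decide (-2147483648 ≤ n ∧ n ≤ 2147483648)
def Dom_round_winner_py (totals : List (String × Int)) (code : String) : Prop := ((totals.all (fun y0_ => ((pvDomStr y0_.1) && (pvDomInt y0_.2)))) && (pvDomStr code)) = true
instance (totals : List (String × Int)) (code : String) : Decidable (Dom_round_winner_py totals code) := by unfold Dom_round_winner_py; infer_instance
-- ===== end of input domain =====

-- B replaces A's extremum scan + tie-count rescan with one stable sort by value, reading winner
-- and runner-up off the sorted head (alternative decomposition, same result; no speed claim).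

-- ===== PORT A =====
-- Literal port of A: guard, then min/max scan (first extremal) plus a 0/1-sum tie count.
def round_winner_py (totals : List (String × Int)) (code : String) : Option String :=
  if PySem.List.len totals < 2 then none
  else
    let items := totals
    if code == "min" then
      match PySem.List.min? items (fun x => x.2) with
      | none => none
      | some best =>
        if (items.map (fun q => if q.2 == best.2 then (1 : Int) else 0)).sum == 1 then
          some best.1
        else none
    else
      match PySem.List.max? items (fun x => x.2) with
      | none => none
      | some best =>
        if (items.map (fun q => if q.2 == best.2 then (1 : Int) else 0)).sum == 1 then
          some best.1
        else none

-- ===== PORT B =====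
-- B: one stable sort by value (ascending for "min", descending otherwise); the winner is
-- the head of the sorted list, returned only when its value differs from the runner-up's.
def round_winner_py_alt (totals : List (String × Int)) (code : String) : Option String :=
  if PySem.List.len totals < 2 then none
  else
    let rev : Bool := !(code == "min")
    let s := PySem.List.sorted totals (fun kv => kv.2) rev
    if (PySem.List.pyGetD s 0 ("", 0)).2 != (PySem.List.pyGetD s 1 ("", 0)).2 then
      some (PySem.List.pyGetD s 0 ("", 0)).1
    else none

-- ===== PRECONDITION & SPEC =====
def Spec_round_winner_py (totals : List (String × Int)) (code : String) (out : Option String) : Prop := out = round_winner_py_alt totals code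
instance (totals : List (String × Int)) (code : String) (out : Option String) : Decidable (Spec_round_winner_py totals code out) := by unfold Spec_round_winner_py; infer_instance

-- ===== CLAIM (what is proved, stated in full; the proofs are below) =====
def Claim_equal_round_winner_py : Prop := ∀ (totals : List (String × Int)) (code : String), Dom_round_winner_py totals code → Spec_round_winner_py totals code (round_winner_py totals code)

-- ===== LEMMAS AND PROOFS =====

-- If exactly one element of xs satisfies p, any two members satisfying p coincide.
theorem pv_countP_one_unique {α : Type} {xs : List α} {p : α → Bool} (h : xs.countP p = 1)
    {a b : α} (ha : a ∈ xs) (hpa : p a = true) (hb : b ∈ xs) (hpb : p b = true) : a = b := by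
  rw [List.countP_eq_length_filter] at h
  obtain ⟨x, hx⟩ := List.length_eq_one_iff.1 h
  have ha' : a ∈ xs.filter p := List.mem_filter.2 ⟨ha, hpa⟩
  have hb' : b ∈ xs.filter p := List.mem_filter.2 ⟨hb, hpb⟩
  rw [hx] at ha' hb'
  simp only [List.mem_singleton] at ha' hb'
  rw [ha', hb']

-- The "min" branch of A equals B's ascending-sort branch.
theorem pv_min_branch (totals : List (String × Int)) (hL : 2 ≤ totals.length) :
    (match PySem.List.min? totals (fun x => x.2) with
     | none => none
     | some best =>
        if (totals.map (fun q => if q.2 == best.2 then (1 : Int) else 0)).sum == 1 then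
          some best.1
        else none)
    = (let s := PySem.List.sorted totals (fun kv => kv.2) false
       if (PySem.List.pyGetD s 0 ("", 0)).2 != (PySem.List.pyGetD s 1 ("", 0)).2 then
         some (PySem.List.pyGetD s 0 ("", 0)).1
       else none) := by
  have hne : totals ≠ [] := by intro h; rw [h] at hL; simp at hL
  have hlen_s : (PySem.List.sorted totals (fun kv => kv.2) false).length = totals.length :=
    PySem.List.length_sorted totals (fun kv => kv.2) false
  obtain ⟨a, b, t, hseq⟩ : ∃ a b t, PySem.List.sorted totals (fun kv => kv.2) false = a :: b :: t := by
    rcases hs : PySem.List.sorted totals (fun kv => kv.2) false with _ | ⟨a, _ | ⟨b, t⟩⟩ <;>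
      rw [hs] at hlen_s <;> simp at hlen_s <;> first | omega | exact ⟨a, b, t, rfl⟩
  have hperm : (PySem.List.sorted totals (fun kv => kv.2) false).Perm totals :=
    PySem.List.sorted_perm totals (fun kv => kv.2) false
  have hpw := PySem.List.sorted_pairwise totals (fun kv => kv.2)
  cases hmin : PySem.List.min? totals (fun x => x.2) with
  | none => exact absurd ((PySem.List.min?_eq_none_iff totals _).1 hmin) hne
  | some m =>
    have hm_mem : m ∈ totals := PySem.List.min?_mem hmin
    have hm_min : ∀ y ∈ totals, m.2 ≤ y.2 := PySem.List.min?_isMin hmin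
    have ha_min : ∀ y ∈ totals, a.2 ≤ y.2 :=
      PySem.List.key_head_sorted_le totals (fun kv => kv.2) hseq
    have ha_mem : a ∈ totals := hperm.mem_iff.1 (by rw [hseq]; simp)
    have ham : a.2 = m.2 := le_antisymm (ha_min m hm_mem) (hm_min a ha_mem)
    have hsum : (totals.map (fun q => if q.2 == m.2 then (1 : Int) else 0)).sum
        = ((totals.countP (fun q => q.2 == m.2) : Nat) : Int) :=
      PySem.List.sum_map_ite_one_zero (fun q => q.2 == m.2) totals
    have hcount : totals.countP (fun q => q.2 == m.2)
        = (a :: b :: t).countP (fun q => q.2 == m.2) := by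
      rw [← hseq]; exact (List.Perm.countP_eq _ hperm).symm
    have hpa : ((a.2 == m.2) : Bool) = true := by simp [ham]
    simp only [hseq, PySem.List.pyGetD_ofNat',
      List.getD_cons_succ, List.getD_cons_zero]
    by_cases hab : a.2 = b.2
    · have h2 : 2 ≤ totals.countP (fun q => q.2 == m.2) := by
        rw [hcount]
        have hpb : ((b.2 == m.2) : Bool) = true := by simp [← hab, ham]
        simp only [List.countP_cons, hpa, hpb, if_true]
        omega
      have hfalse : ((totals.map (fun q => if q.2 == m.2 then (1 : Int) else 0)).sum == 1) = false := by
        rw [hsum]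
        have h' : ((totals.countP (fun q => q.2 == m.2) : Nat) : Int) ≠ 1 := by
          exact_mod_cast (show totals.countP (fun q => q.2 == m.2) ≠ 1 by omega)
        simp [h']
      rw [hfalse]
      simp [hab]
    · have hlt : a.2 < b.2 := lt_of_le_of_ne (by
        rw [hseq] at hpw
        exact (List.pairwise_cons.1 hpw).1 b (by simp)) hab
      have htail : ∀ q ∈ b :: t, ¬ ((q.2 == m.2) = true) := by
        intro q hq
        have hbq : b.2 ≤ q.2 := by
          rw [hseq] at hpw
          rcases List.mem_cons.1 hq with h | h
          · rw [h]
          · exact ((List.pairwise_cons.1 (List.pairwise_cons.1 hpw).2).1 q h)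
        simp only [beq_iff_eq]
        omega
      have h1 : totals.countP (fun q => q.2 == m.2) = 1 := by
        rw [hcount]
        have hz : (b :: t).countP (fun q => q.2 == m.2) = 0 := List.countP_eq_zero.2 htail
        simp only [List.countP_cons, hpa, if_true]
        simp only [List.countP_cons] at hz
        omega
      have htrue : ((totals.map (fun q => if q.2 == m.2 then (1 : Int) else 0)).sum == 1) = true := by
        rw [hsum, h1]; norm_num
      rw [htrue]
      have hma : m = a :=
        pv_countP_one_unique (p := fun q => q.2 == m.2) h1 hm_mem (by simp) ha_mem hpa
      simp [hab, hma]

-- The "max" branch of A equals B's descending-sort branch.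
theorem pv_max_branch (totals : List (String × Int)) (hL : 2 ≤ totals.length) :
    (match PySem.List.max? totals (fun x => x.2) with
     | none => none
     | some best =>
        if (totals.map (fun q => if q.2 == best.2 then (1 : Int) else 0)).sum == 1 then
          some best.1
        else none)
    = (let s := PySem.List.sorted totals (fun kv => kv.2) true
       if (PySem.List.pyGetD s 0 ("", 0)).2 != (PySem.List.pyGetD s 1 ("", 0)).2 then
         some (PySem.List.pyGetD s 0 ("", 0)).1
       else none) := by
  have hne : totals ≠ [] := by intro h; rw [h] at hL; simp at hL
  have hlen_s : (PySem.List.sorted totals (fun kv => kv.2) true).length = totals.length :=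
    PySem.List.length_sorted totals (fun kv => kv.2) true
  obtain ⟨a, b, t, hseq⟩ : ∃ a b t, PySem.List.sorted totals (fun kv => kv.2) true = a :: b :: t := by
    rcases hs : PySem.List.sorted totals (fun kv => kv.2) true with _ | ⟨a, _ | ⟨b, t⟩⟩ <;>
      rw [hs] at hlen_s <;> simp at hlen_s <;> first | omega | exact ⟨a, b, t, rfl⟩
  have hperm : (PySem.List.sorted totals (fun kv => kv.2) true).Perm totals :=
    PySem.List.sorted_perm totals (fun kv => kv.2) true
  have hpw := PySem.List.sorted_pairwise_rev totals (fun kv => kv.2)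
  cases hmax : PySem.List.max? totals (fun x => x.2) with
  | none => exact absurd ((PySem.List.max?_eq_none_iff totals _).1 hmax) hne
  | some m =>
    have hm_mem : m ∈ totals := PySem.List.max?_mem hmax
    have hm_max : ∀ y ∈ totals, y.2 ≤ m.2 := PySem.List.max?_isMax hmax
    have ha_max : ∀ y ∈ totals, y.2 ≤ a.2 :=
      PySem.List.key_head_sorted_rev_ge totals (fun kv => kv.2) hseq
    have ha_mem : a ∈ totals := hperm.mem_iff.1 (by rw [hseq]; simp)
    have ham : a.2 = m.2 := le_antisymm (hm_max a ha_mem) (ha_max m hm_mem)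
    have hsum : (totals.map (fun q => if q.2 == m.2 then (1 : Int) else 0)).sum
        = ((totals.countP (fun q => q.2 == m.2) : Nat) : Int) :=
      PySem.List.sum_map_ite_one_zero (fun q => q.2 == m.2) totals
    have hcount : totals.countP (fun q => q.2 == m.2)
        = (a :: b :: t).countP (fun q => q.2 == m.2) := by
      rw [← hseq]; exact (List.Perm.countP_eq _ hperm).symm
    have hpa : ((a.2 == m.2) : Bool) = true := by simp [ham]
    simp only [hseq, PySem.List.pyGetD_ofNat',
      List.getD_cons_succ, List.getD_cons_zero]
    by_cases hab : a.2 = b.2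
    · have h2 : 2 ≤ totals.countP (fun q => q.2 == m.2) := by
        rw [hcount]
        have hpb : ((b.2 == m.2) : Bool) = true := by simp [← hab, ham]
        simp only [List.countP_cons, hpa, hpb, if_true]
        omega
      have hfalse : ((totals.map (fun q => if q.2 == m.2 then (1 : Int) else 0)).sum == 1) = false := by
        rw [hsum]
        have h' : ((totals.countP (fun q => q.2 == m.2) : Nat) : Int) ≠ 1 := by
          exact_mod_cast (show totals.countP (fun q => q.2 == m.2) ≠ 1 by omega)
        simp [h']
      rw [hfalse]
      simp [hab]
    · have hlt : b.2 < a.2 := lt_of_le_of_ne (by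
        rw [hseq] at hpw
        exact (List.pairwise_cons.1 hpw).1 b (by simp)) (fun h => hab h.symm)
      have htail : ∀ q ∈ b :: t, ¬ ((q.2 == m.2) = true) := by
        intro q hq
        have hbq : q.2 ≤ b.2 := by
          rw [hseq] at hpw
          rcases List.mem_cons.1 hq with h | h
          · rw [h]
          · exact ((List.pairwise_cons.1 (List.pairwise_cons.1 hpw).2).1 q h)
        simp only [beq_iff_eq]
        omega
      have h1 : totals.countP (fun q => q.2 == m.2) = 1 := by
        rw [hcount]
        have hz : (b :: t).countP (fun q => q.2 == m.2) = 0 := List.countP_eq_zero.2 htail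
        simp only [List.countP_cons, hpa, if_true]
        simp only [List.countP_cons] at hz
        omega
      have htrue : ((totals.map (fun q => if q.2 == m.2 then (1 : Int) else 0)).sum == 1) = true := by
        rw [hsum, h1]; norm_num
      rw [htrue]
      have hma : m = a :=
        pv_countP_one_unique (p := fun q => q.2 == m.2) h1 hm_mem (by simp) ha_mem hpa
      simp [hab, hma]

-- ===== VERDICT (by name: the statement is the Claim_ definition above) =====
theorem round_winner_py_spec : Claim_equal_round_winner_py := by
  intro totals code _
  unfold Spec_round_winner_py round_winner_py round_winner_py_alt
  by_cases hlen : PySem.List.len totals < 2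
  · rw [if_pos hlen, if_pos hlen]
  · rw [if_neg hlen, if_neg hlen]
    have hL : 2 ≤ totals.length := by
      rw [PySem.List.len_eq] at hlen; omega
    by_cases hc : (code == "min") = true
    · simp only [hc, if_true, Bool.not_true]
      exact pv_min_branch totals hL
    · rw [Bool.not_eq_true] at hc
      simp only [hc, Bool.not_false, Bool.false_eq_true, if_false]
      exact pv_max_branch totals hL
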